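-- pv_equiv track=rewrite | github.com/QUANHAO-NCU/pytorch-visual-block | Working/myMethods/Tools.py | ConvHW2newHW
-- ===== SOURCE A (Python) =====
-- def ConvHW2newHW(HWin: list, HWout: list):
--     """
--     计算卷积时从旧HW转换到新HW时的可以使用的kernel_size,stride,padding参数
--     """
--     result = []
--     Hin = HWin[0]
--     Win = HWin[1]
--     Hout = HWout[0]
--     Wout = HWout[1]
--     for k in range(1, 15):
--         for s in range(1, 10):
--             for p in range(0, 10):
--                 tmpH = (Hin - k + 2 * p) // s + 1
--                 tmpW = (Win - k + 2 * p) // s + 1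
--                 if tmpH == Hout and tmpW == Wout:
--                     result.append([k, s, p])
--     return result
-- ===== SOURCE B (Python) =====
-- def ConvHW2newHW(HWin: list, HWout: list):
--     """
--     Same result as A, but the innermost per-p test is replaced by solving the
--     floor-division inequalities for p in closed form (an interval), then
--     enumerating that interval.
--     """
--     result = []
--     Hin, Win = HWin[0], HWin[1]
--     Hout, Wout = HWout[0], HWout[1]
--     for k in range(1, 15):
--         for s in range(1, 10):
--             loH = s * (Hout - 1) - (Hin - k)
--             hiH = s * Hout - (Hin - k) - 1
--             loW = s * (Wout - 1) - (Win - k)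
--             hiW = s * Wout - (Win - k) - 1
--             p_lo = max(0, -((-loH) // 2), -((-loW) // 2))
--             p_hi = min(9, hiH // 2, hiW // 2)
--             for p in range(p_lo, p_hi + 1):
--                 result.append([k, s, p])
--     return result
-- ===== Notes on version B (the rewrite author's own statement) =====
-- stated objective: alternative
-- what changed: The innermost brute-force scan over p in range(0,10) testing two floor divisions per p is replaced by solving the floor-division inequalities for p in closed form (ceil/floor of rational bounds), intersecting the H- and W-intervals with [0,9], and enumerating the resulting contiguous p-interval directly.
import Mathlib
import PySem

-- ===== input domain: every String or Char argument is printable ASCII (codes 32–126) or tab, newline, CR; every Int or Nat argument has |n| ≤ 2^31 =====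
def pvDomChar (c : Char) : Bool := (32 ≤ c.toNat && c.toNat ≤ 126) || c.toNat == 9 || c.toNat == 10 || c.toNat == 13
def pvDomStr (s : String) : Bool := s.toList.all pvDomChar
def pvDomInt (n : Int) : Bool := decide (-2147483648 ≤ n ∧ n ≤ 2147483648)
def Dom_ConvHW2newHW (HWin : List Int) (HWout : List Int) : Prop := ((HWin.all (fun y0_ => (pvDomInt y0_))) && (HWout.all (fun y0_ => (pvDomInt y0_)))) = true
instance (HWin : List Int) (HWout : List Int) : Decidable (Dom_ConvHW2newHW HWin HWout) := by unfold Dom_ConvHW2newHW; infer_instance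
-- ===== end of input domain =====

-- B replaces A's innermost brute-force scan over p by a closed-form p-interval
-- derived from the floor-division inequalities (objective: alternative decomposition).


-- ===== PORT A =====
def ConvHW2newHW (HWin : List Int) (HWout : List Int) : List (List Int) :=
  let Hin := (PySem.List.pyGet? HWin 0).getD 0   -- Pre_ guarantees the index is in range
  let Win := (PySem.List.pyGet? HWin 1).getD 0
  let Hout := (PySem.List.pyGet? HWout 0).getD 0
  let Wout := (PySem.List.pyGet? HWout 1).getD 0
  (PySem.List.pyRange 1 15).foldl (fun result k =>
    (PySem.List.pyRange 1 10).foldl (fun result s =>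
      (PySem.List.pyRange 0 10).foldl (fun result p =>
        let tmpH := PySem.Int.floordiv (Hin - k + 2 * p) s + 1
        let tmpW := PySem.Int.floordiv (Win - k + 2 * p) s + 1
        if tmpH = Hout ∧ tmpW = Wout then result ++ [[k, s, p]] else result)
        result)
      result)
    []

-- ===== PORT B =====
def ConvHW2newHW_alt (HWin : List Int) (HWout : List Int) : List (List Int) :=
  let Hin := (PySem.List.pyGet? HWin 0).getD 0   -- Pre_ guarantees the index is in range
  let Win := (PySem.List.pyGet? HWin 1).getD 0
  let Hout := (PySem.List.pyGet? HWout 0).getD 0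
  let Wout := (PySem.List.pyGet? HWout 1).getD 0
  (PySem.List.pyRange 1 15).foldl (fun result k =>
    (PySem.List.pyRange 1 10).foldl (fun result s =>
      let loH := s * (Hout - 1) - (Hin - k)
      let hiH := s * Hout - (Hin - k) - 1
      let loW := s * (Wout - 1) - (Win - k)
      let hiW := s * Wout - (Win - k) - 1
      let pLo := max 0 (max (-(PySem.Int.floordiv (-loH) 2)) (-(PySem.Int.floordiv (-loW) 2)))
      let pHi := min 9 (min (PySem.Int.floordiv hiH 2) (PySem.Int.floordiv hiW 2))
      result ++ (PySem.List.pyRange pLo (pHi + 1)).map (fun p => [k, s, p]))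
      result)
    []

-- ===== PRECONDITION & SPEC =====
-- Pre_ excludes exactly the inputs where A raises IndexError: a list with fewer than two elements.
def Pre_ConvHW2newHW (HWin : List Int) (HWout : List Int) : Prop :=
  2 ≤ HWin.length ∧ 2 ≤ HWout.length
instance (HWin : List Int) (HWout : List Int) : Decidable (Pre_ConvHW2newHW HWin HWout) := by
  unfold Pre_ConvHW2newHW; infer_instance
def pvWitness_ConvHW2newHW : List Int × List Int := ([8, 8], [4, 4])

def Spec_ConvHW2newHW (HWin : List Int) (HWout : List Int) (out : List (List Int)) : Prop := out = ConvHW2newHW_alt HWin HWout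
instance (HWin : List Int) (HWout : List Int) (out : List (List Int)) : Decidable (Spec_ConvHW2newHW HWin HWout out) := by unfold Spec_ConvHW2newHW; infer_instance

-- ===== CLAIM (what is proved, stated in full; the proofs are below) =====
def Claim_equal_ConvHW2newHW : Prop := ∀ (HWin : List Int) (HWout : List Int), Dom_ConvHW2newHW HWin HWout → Pre_ConvHW2newHW HWin HWout → Spec_ConvHW2newHW HWin HWout (ConvHW2newHW HWin HWout)

-- ===== LEMMAS AND PROOFS =====

-- A filter of an integer range by an interval predicate is a subrange.
lemma filter_pyRange (lo hi : Int) : ∀ (a b : Int),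
    (PySem.List.pyRange a b).filter (fun p => decide (lo ≤ p ∧ p < hi))
      = PySem.List.pyRange (max a lo) (min b hi) := by
  intro a b
  by_cases hab : a < b
  · rw [PySem.List.pyRange_one_cons hab]
    have ih := filter_pyRange lo hi (a + 1) b
    by_cases hp : lo ≤ a ∧ a < hi
    · have h1 : max a lo = a := by omega
      have h2 : max (a + 1) lo = a + 1 := by omega
      have h3 : a < min b hi := by omega
      rw [List.filter_cons_of_pos (by simpa using hp), ih, h1, h2,
        PySem.List.pyRange_one_cons h3]
    · rw [List.filter_cons_of_neg (by simpa using hp), ih]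
      rcases not_and_or.mp hp with h | h
      · have : max a lo = max (a + 1) lo := by omega
        rw [this]
      · -- hi ≤ a : both sides are empty ranges
        have e1 : PySem.List.pyRange (max (a+1) lo) (min b hi) = [] := by
          rw [show PySem.List.pyRange (max (a+1) lo) (min b hi)
              = List.filter (fun p => decide (max (a+1) lo ≤ p ∧ p < min b hi)) (PySem.List.pyRange (max (a+1) lo) (min b hi)) from ?_]
          · apply List.filter_eq_nil_iff.mpr
            intro x hx
            simp only [decide_eq_true_eq]
            have := PySem.List.mem_pyRange_one.mp hx
            omega
          · apply (List.filter_eq_self.mpr ?_).symm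
            intro x hx
            have := PySem.List.mem_pyRange_one.mp hx
            simp only [decide_eq_true_eq]
            omega
        have e2 : PySem.List.pyRange (max a lo) (min b hi) = [] := by
          apply List.eq_nil_iff_forall_not_mem.mpr
          intro x hx
          have := PySem.List.mem_pyRange_one.mp hx
          omega
        rw [e1, e2]
  · have e0 : PySem.List.pyRange a b = [] := by
      apply List.eq_nil_iff_forall_not_mem.mpr
      intro x hx
      have := PySem.List.mem_pyRange_one.mp hx
      omega
    have e2 : PySem.List.pyRange (max a lo) (min b hi) = [] := by
      apply List.eq_nil_iff_forall_not_mem.mpr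
      intro x hx
      have := PySem.List.mem_pyRange_one.mp hx
      omega
    rw [e0, e2, List.filter_nil]
termination_by a b => (b - a).toNat
decreasing_by omega

-- The per-p success test is membership in the closed-form interval B derives.
lemma cond_iff (Hin Win Hout Wout k s p : Int) (hs : 0 < s) :
    (PySem.Int.floordiv (Hin - k + 2 * p) s + 1 = Hout ∧
     PySem.Int.floordiv (Win - k + 2 * p) s + 1 = Wout)
    ↔ (-(PySem.Int.floordiv (-(s * (Hout - 1) - (Hin - k))) 2) ≤ p ∧
       -(PySem.Int.floordiv (-(s * (Wout - 1) - (Win - k))) 2) ≤ p ∧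
       p ≤ PySem.Int.floordiv (s * Hout - (Hin - k) - 1) 2 ∧
       p ≤ PySem.Int.floordiv (s * Wout - (Win - k) - 1) 2) := by
  have hH : PySem.Int.floordiv (Hin - k + 2 * p) s = Hout - 1 ↔
      (Hout - 1) * s ≤ Hin - k + 2 * p ∧ Hin - k + 2 * p < (Hout - 1 + 1) * s :=
    PySem.Int.floordiv_eq_iff_of_pos hs
  have hW : PySem.Int.floordiv (Win - k + 2 * p) s = Wout - 1 ↔
      (Wout - 1) * s ≤ Win - k + 2 * p ∧ Win - k + 2 * p < (Wout - 1 + 1) * s :=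
    PySem.Int.floordiv_eq_iff_of_pos hs
  have e1 := PySem.Int.floordiv_mul_add_mod (-(s * (Hout - 1) - (Hin - k))) 2
  have e1a := PySem.Int.mod_nonneg (-(s * (Hout - 1) - (Hin - k))) (b := 2) (by norm_num)
  have e1b := PySem.Int.mod_lt (-(s * (Hout - 1) - (Hin - k))) (b := 2) (by norm_num)
  have e2 := PySem.Int.floordiv_mul_add_mod (-(s * (Wout - 1) - (Win - k))) 2
  have e2a := PySem.Int.mod_nonneg (-(s * (Wout - 1) - (Win - k))) (b := 2) (by norm_num)
  have e2b := PySem.Int.mod_lt (-(s * (Wout - 1) - (Win - k))) (b := 2) (by norm_num)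
  have e3 := PySem.Int.floordiv_mul_add_mod (s * Hout - (Hin - k) - 1) 2
  have e3a := PySem.Int.mod_nonneg (s * Hout - (Hin - k) - 1) (b := 2) (by norm_num)
  have e3b := PySem.Int.mod_lt (s * Hout - (Hin - k) - 1) (b := 2) (by norm_num)
  have e4 := PySem.Int.floordiv_mul_add_mod (s * Wout - (Win - k) - 1) 2
  have e4a := PySem.Int.mod_nonneg (s * Wout - (Win - k) - 1) (b := 2) (by norm_num)
  have e4b := PySem.Int.mod_lt (s * Wout - (Win - k) - 1) (b := 2) (by norm_num)
  have r1 : (Hout - 1) * s = s * (Hout - 1) := by ring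
  have r2 : (Hout - 1 + 1) * s = s * Hout := by ring
  have r3 : (Wout - 1) * s = s * (Wout - 1) := by ring
  have r4 : (Wout - 1 + 1) * s = s * Wout := by ring
  constructor
  · rintro ⟨h1, h2⟩
    have h1' : PySem.Int.floordiv (Hin - k + 2 * p) s = Hout - 1 := by omega
    have h2' : PySem.Int.floordiv (Win - k + 2 * p) s = Wout - 1 := by omega
    have := hH.mp h1'
    have := hW.mp h2'
    omega
  · rintro ⟨h1, h2, h3, h4⟩
    have bH : PySem.Int.floordiv (Hin - k + 2 * p) s = Hout - 1 := hH.mpr (by omega)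
    have bW : PySem.Int.floordiv (Win - k + 2 * p) s = Wout - 1 := hW.mpr (by omega)
    omega

-- Per (k,s): A's p-scan equals B's interval enumeration.
lemma inner_eq (Hin Win Hout Wout k s : Int) (hs : 0 < s) (res : List (List Int)) :
    (PySem.List.pyRange 0 10).foldl (fun result p =>
        let tmpH := PySem.Int.floordiv (Hin - k + 2 * p) s + 1
        let tmpW := PySem.Int.floordiv (Win - k + 2 * p) s + 1
        if tmpH = Hout ∧ tmpW = Wout then result ++ [[k, s, p]] else result) res
    = res ++ (PySem.List.pyRange
        (max 0 (max (-(PySem.Int.floordiv (-(s * (Hout - 1) - (Hin - k))) 2))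
                    (-(PySem.Int.floordiv (-(s * (Wout - 1) - (Win - k))) 2))))
        (min 9 (min (PySem.Int.floordiv (s * Hout - (Hin - k) - 1) 2)
                    (PySem.Int.floordiv (s * Wout - (Win - k) - 1) 2)) + 1)).map
        (fun p => [k, s, p]) := by
  rw [PySem.List.foldl_append_ite
    (p := fun p => PySem.Int.floordiv (Hin - k + 2 * p) s + 1 = Hout ∧
                   PySem.Int.floordiv (Win - k + 2 * p) s + 1 = Wout)
    (f := fun p => [k, s, p])]
  congr 1
  rw [List.filter_congr (l := PySem.List.pyRange 0 10)
      (q := fun p => decide ((max 0 (max (-(PySem.Int.floordiv (-(s * (Hout - 1) - (Hin - k))) 2))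
                  (-(PySem.Int.floordiv (-(s * (Wout - 1) - (Win - k))) 2)))) ≤ p ∧
        p < min 9 (min (PySem.Int.floordiv (s * Hout - (Hin - k) - 1) 2)
                       (PySem.Int.floordiv (s * Wout - (Win - k) - 1) 2)) + 1))
      ?_]
  · rw [filter_pyRange, ← max_assoc, max_self]
    have hmin : min 10 (min 9 (min (PySem.Int.floordiv (s * Hout - (Hin - k) - 1) 2)
        (PySem.Int.floordiv (s * Wout - (Win - k) - 1) 2)) + 1)
        = min 9 (min (PySem.Int.floordiv (s * Hout - (Hin - k) - 1) 2)
        (PySem.Int.floordiv (s * Wout - (Win - k) - 1) 2)) + 1 := by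
      apply min_eq_right
      have := min_le_left (9 : Int)
        (min (PySem.Int.floordiv (s * Hout - (Hin - k) - 1) 2)
             (PySem.Int.floordiv (s * Wout - (Win - k) - 1) 2))
      linarith
    rw [hmin]
  · intro p hp
    have hmem := PySem.List.mem_pyRange_one.mp hp
    simp only [decide_eq_decide, Int.lt_add_one_iff, max_le_iff, le_min_iff]
    rw [cond_iff Hin Win Hout Wout k s p hs]
    constructor
    · rintro ⟨h1, h2, h3, h4⟩
      exact ⟨⟨hmem.1, h1, h2⟩, by omega, h3, h4⟩
    · rintro ⟨⟨_, h1, h2⟩, _, h3, h4⟩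
      exact ⟨h1, h2, h3, h4⟩

-- ===== VERDICT (by name: the statement is the Claim_ definition above) =====
theorem ConvHW2newHW_spec : Claim_equal_ConvHW2newHW := by
  intro HWin HWout _ _
  show ConvHW2newHW HWin HWout = ConvHW2newHW_alt HWin HWout
  unfold ConvHW2newHW ConvHW2newHW_alt
  apply PySem.List.foldl_congr_mem
  intro acc k _
  apply PySem.List.foldl_congr_mem
  intro acc2 s hs
  have hspos : 0 < s := (PySem.List.mem_pyRange_one.mp hs).1
  exact inner_eq _ _ _ _ k s hspos acc2
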